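-- pv_equiv track=rewrite | github.com/truist/Advent-of-Code-24 | 06/guard.py | turn_if_blocked
-- ===== SOURCE A (Python) =====
-- def turn_if_blocked(grid, row, col, direction):
--     if direction == "N" and grid[row - 1][col] == "#":
--         return turn_if_blocked(grid, row, col, "E")
--     if direction == "E" and grid[row][col + 1] == "#":
--         return turn_if_blocked(grid, row, col, "S")
--     if direction == "S" and grid[row + 1][col] == "#":
--         return turn_if_blocked(grid, row, col, "W")
--     if direction == "W" and grid[row][col - 1] == "#":
--         return turn_if_blocked(grid, row, col, "N")
--     return direction
-- ===== SOURCE B (Python) =====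
-- STEP = {"N": (-1, 0), "E": (0, 1), "S": (1, 0), "W": (0, -1)}
-- CLOCKWISE = {"N": "E", "E": "S", "S": "W", "W": "N"}
--
-- def turn_if_blocked(grid, row, col, direction):
--     # iterative state machine over a direction table; at most 4 probes
--     for _ in range(4):
--         delta = STEP.get(direction)
--         if delta is None or grid[row + delta[0]][col + delta[1]] != "#":
--             return direction
--         direction = CLOCKWISE[direction]
--     return direction
-- ===== Notes on version B (the rewrite author's own statement) =====
-- stated objective: idiomatic
-- what changed: Replaced the four hard-coded if/recurse branches by a direction table (delta + next-clockwise dicts) driven by a bounded iterative loop.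
import Mathlib
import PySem

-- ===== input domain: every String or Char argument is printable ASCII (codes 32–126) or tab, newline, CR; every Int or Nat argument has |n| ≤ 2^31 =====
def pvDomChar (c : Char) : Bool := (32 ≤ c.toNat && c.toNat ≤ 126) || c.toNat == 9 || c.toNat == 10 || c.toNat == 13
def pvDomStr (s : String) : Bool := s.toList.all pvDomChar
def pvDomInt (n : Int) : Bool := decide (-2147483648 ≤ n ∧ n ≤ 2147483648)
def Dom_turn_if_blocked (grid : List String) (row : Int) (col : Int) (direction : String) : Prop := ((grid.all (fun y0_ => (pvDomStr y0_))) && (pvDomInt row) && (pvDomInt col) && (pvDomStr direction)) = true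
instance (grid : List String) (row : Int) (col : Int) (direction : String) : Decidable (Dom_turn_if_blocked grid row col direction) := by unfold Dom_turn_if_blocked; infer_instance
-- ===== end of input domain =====

-- B replaces A's four hard-coded if/recurse branches by a direction table driven by a
-- bounded iterative loop (objective: idiomatic; same cost). Return-value equivalence only.

-- grid[r][c] with Python index semantics; none = IndexError (excluded by Pre_)
def gcell (grid : List String) (r c : Int) : Option Char :=
  (PySem.List.pyGet? grid r).bind (fun s => PySem.Str.pyGet? s c)

-- ===== PORT A =====
-- A's recursion is unbounded only when every probed neighbour is '#' (Python then raises
-- RecursionError); Pre_ excludes that, and inside Pre_ at most 4 probes happen, so the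
-- literal recursion is given fuel 4.
def turnRecA (grid : List String) (row col : Int) : Nat → String → String
  | 0, d => d
  | f+1, d =>
    if d = "N" ∧ gcell grid (row - 1) col = some '#' then turnRecA grid row col f "E"
    else if d = "E" ∧ gcell grid row (col + 1) = some '#' then turnRecA grid row col f "S"
    else if d = "S" ∧ gcell grid (row + 1) col = some '#' then turnRecA grid row col f "W"
    else if d = "W" ∧ gcell grid row (col - 1) = some '#' then turnRecA grid row col f "N"
    else d

def turn_if_blocked (grid : List String) (row : Int) (col : Int) (direction : String) : String :=
  turnRecA grid row col 4 direction

-- ===== PORT B =====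
def pvStep : PySem.Dict String (Int × Int) :=
  PySem.Dict.ofList [("N", (-1, 0)), ("E", (0, 1)), ("S", (1, 0)), ("W", (0, -1))]
def pvClockwise : PySem.Dict String String :=
  PySem.Dict.ofList [("N", "E"), ("E", "S"), ("S", "W"), ("W", "N")]

-- Source B's 'for _ in range(4)' loop with early return
def turnLoopB (grid : List String) (row col : Int) : Nat → String → String
  | 0, d => d
  | n+1, d =>
    match PySem.Dict.get? pvStep d with
    | none => d
    | some dl =>
      if gcell grid (row + dl.1) (col + dl.2) ≠ some '#' then d
      else turnLoopB grid row col n ((PySem.Dict.get? pvClockwise d).getD d)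
      -- CLOCKWISE[direction]: the key is present whenever STEP.get succeeded, so getD's
      -- default is never used

def turn_if_blocked_alt (grid : List String) (row : Int) (col : Int) (direction : String) : String :=
  turnLoopB grid row col 4 direction

-- ===== PRECONDITION & SPEC =====
-- the neighbour cell A probes for direction d
def probe (grid : List String) (row col : Int) (d : String) : Option Char :=
  if d = "N" then gcell grid (row - 1) col
  else if d = "E" then gcell grid row (col + 1)
  else if d = "S" then gcell grid (row + 1) col
  else gcell grid row (col - 1)

def cwDir (d : String) : String :=
  if d = "N" then "E" else if d = "E" then "S" else if d = "S" then "W" else "N"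

def blkP (grid : List String) (row col : Int) (d : String) : Prop :=
  probe grid row col d = some '#'

def okP (grid : List String) (row col : Int) (d : String) : Prop :=
  probe grid row col d ≠ none ∧ probe grid row col d ≠ some '#'

-- Pre_ excludes exactly the inputs where Python A raises: a probed neighbour index out of
-- range on the turning path (IndexError), or all four neighbours '#' (RecursionError).
def Pre_turn_if_blocked (grid : List String) (row : Int) (col : Int) (direction : String) : Prop :=
  (direction = "N" ∨ direction = "E" ∨ direction = "S" ∨ direction = "W") →
    (okP grid row col direction ∨
     (blkP grid row col direction ∧ okP grid row col (cwDir direction)) ∨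
     (blkP grid row col direction ∧ blkP grid row col (cwDir direction) ∧
        okP grid row col (cwDir (cwDir direction))) ∨
     (blkP grid row col direction ∧ blkP grid row col (cwDir direction) ∧
        blkP grid row col (cwDir (cwDir direction)) ∧
        okP grid row col (cwDir (cwDir (cwDir direction)))))
instance (grid : List String) (row : Int) (col : Int) (direction : String) : Decidable (Pre_turn_if_blocked grid row col direction) := by unfold Pre_turn_if_blocked okP blkP; infer_instance

def pvWitness_turn_if_blocked : List String × Int × Int × String := (["...", "...", "..."], 1, 1, "N")

def Spec_turn_if_blocked (grid : List String) (row : Int) (col : Int) (direction : String) (out : String) : Prop := out = turn_if_blocked_alt grid row col direction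
instance (grid : List String) (row : Int) (col : Int) (direction : String) (out : String) : Decidable (Spec_turn_if_blocked grid row col direction out) := by unfold Spec_turn_if_blocked; infer_instance

-- ===== CLAIM (what is proved, stated in full; the proofs are below) =====
def Claim_equal_turn_if_blocked : Prop := ∀ (grid : List String) (row : Int) (col : Int) (direction : String), Dom_turn_if_blocked grid row col direction → Pre_turn_if_blocked grid row col direction → Spec_turn_if_blocked grid row col direction (turn_if_blocked grid row col direction)

-- ===== LEMMAS AND PROOFS =====
lemma step_get_none (d : String) (hN : d ≠ "N") (hE : d ≠ "E") (hS : d ≠ "S") (hW : d ≠ "W") :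
    PySem.Dict.get? pvStep d = none := by
  have h : pvStep = PySem.Dict.mk [("N", (-1, 0)), ("E", (0, 1)), ("S", (1, 0)), ("W", (0, -1))] := by decide
  rw [h]
  simp [PySem.Dict.get?, beq_iff_eq,
    Ne.symm hN, Ne.symm hE, Ne.symm hS, Ne.symm hW]

-- The two ports agree for EVERY fuel and direction (both return the current direction
-- when a probe fails or fuel runs out), so equivalence needs no case split on Pre_.
lemma rec_eq_loop (grid : List String) (row col : Int) :
    ∀ n d, turnRecA grid row col n d = turnLoopB grid row col n d := by
  intro n
  induction n with
  | zero => intro d; rfl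
  | succ n ih =>
    intro d
    have h1 : row + (-1 : Int) = row - 1 := by ring
    have h2 : col + (0 : Int) = col := by ring
    have h3 : row + (0 : Int) = row := by ring
    have h4 : col + (-1 : Int) = col - 1 := by ring
    by_cases hN : d = "N"
    · subst hN
      have hs : PySem.Dict.get? pvStep "N" = some ((-1 : Int), (0 : Int)) := by decide
      have hc : PySem.Dict.get? pvClockwise "N" = some "E" := by decide
      simp [turnRecA, turnLoopB, hs, hc, h1, h2]
      split_ifs with h <;> simp_all
    · by_cases hE : d = "E"
      · subst hE
        have hs : PySem.Dict.get? pvStep "E" = some ((0 : Int), (1 : Int)) := by decide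
        have hc : PySem.Dict.get? pvClockwise "E" = some "S" := by decide
        simp [turnRecA, turnLoopB, hs, hc, h3]
        split_ifs with h <;> simp_all
      · by_cases hS : d = "S"
        · subst hS
          have hs : PySem.Dict.get? pvStep "S" = some ((1 : Int), (0 : Int)) := by decide
          have hc : PySem.Dict.get? pvClockwise "S" = some "W" := by decide
          simp [turnRecA, turnLoopB, hs, hc, h2]
          split_ifs with h <;> simp_all
        · by_cases hW : d = "W"
          · subst hW
            have hs : PySem.Dict.get? pvStep "W" = some ((0 : Int), (-1 : Int)) := by decide
            have hc : PySem.Dict.get? pvClockwise "W" = some "N" := by decide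
            simp [turnRecA, turnLoopB, hs, hc, h3, h4]
            split_ifs with h <;> simp_all
          · simp [turnRecA, turnLoopB, step_get_none d hN hE hS hW, hN, hE, hS, hW]

-- ===== VERDICT (by name: the statement is the Claim_ definition above) =====
theorem turn_if_blocked_spec : Claim_equal_turn_if_blocked := by
  intro grid row col direction _ _
  unfold Spec_turn_if_blocked turn_if_blocked turn_if_blocked_alt
  exact rec_eq_loop grid row col 4 direction
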